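-- pv_equiv track=rewrite | github.com/pypi-data/pypi-mirror-386 | packages/tnfr/tnfr-6.0.0.tar.gz/tnfr-6.0.0/src/tnfr/dynamics/dnfr.py | _iter_chunk_offsets
-- ===== SOURCE A (Python) =====
-- from collections.abc import Callable, Iterator, Mapping, MutableMapping, Sequence
--
-- def _iter_chunk_offsets(total: int, jobs: int) -> Iterator[tuple[int, int]]:
--     """Yield ``(start, end)`` offsets splitting ``total`` items across ``jobs``."""
--
--     if total <= 0 or jobs <= 1:
--         return
--
--     jobs = max(1, min(int(jobs), total))
--     base, extra = divmod(total, jobs)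
--     start = 0
--     for i in range(jobs):
--         size = base + (1 if i < extra else 0)
--         if size <= 0:
--             continue
--         end = start + size
--         yield start, end
--         start = end
-- ===== SOURCE B (Python) =====
-- def _iter_chunk_offsets(total: int, jobs: int):
--     """Yield ``(start, end)`` offsets splitting ``total`` items across ``jobs``."""
--     if total <= 0 or jobs <= 1:
--         return
--     jobs = max(1, min(int(jobs), total))
--     base, extra = divmod(total, jobs)
--     for i in range(jobs):
--         yield i * base + min(i, extra), (i + 1) * base + min(i + 1, extra)
-- ===== Notes on version B (the rewrite author's own statement) =====
-- stated objective: simpler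
-- what changed: Replaces the running start/end accumulator and the size<=0 continue check with a direct closed-form boundary i*base+min(i,extra) for each chunk index, making every iteration independent.
import Mathlib
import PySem

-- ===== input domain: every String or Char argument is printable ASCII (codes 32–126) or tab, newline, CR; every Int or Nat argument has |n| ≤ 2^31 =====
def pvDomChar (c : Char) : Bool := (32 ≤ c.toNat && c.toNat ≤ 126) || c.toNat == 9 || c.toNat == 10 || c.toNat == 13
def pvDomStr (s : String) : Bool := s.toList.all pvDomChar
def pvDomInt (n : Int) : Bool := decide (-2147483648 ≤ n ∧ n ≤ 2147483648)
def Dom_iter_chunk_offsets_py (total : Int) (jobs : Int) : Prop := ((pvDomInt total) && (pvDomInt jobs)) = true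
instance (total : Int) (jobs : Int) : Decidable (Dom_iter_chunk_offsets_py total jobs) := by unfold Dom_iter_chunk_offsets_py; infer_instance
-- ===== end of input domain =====

-- B replaces A's running start-accumulator (and its dead 'size <= 0: continue' check) with a
-- direct closed-form boundary i*base + min(i, extra) per chunk index; objective: simpler.

-- ===== PORT A =====
-- literal transliteration of A: guard, clamp, divmod, then a left fold carrying (yielded list, start)
def iter_chunk_offsets_py (total : Int) (jobs : Int) : List (Int × Int) :=
  if total ≤ 0 ∨ jobs ≤ 1 then [] else
    let jobs' := max 1 (min jobs total)
    let base := PySem.Int.floordiv total jobs'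
    let extra := PySem.Int.mod total jobs'
    ((PySem.List.pyRange 0 jobs' 1).foldl
      (fun (acc : List (Int × Int) × Int) i =>
        let size := base + (if i < extra then 1 else 0)
        if size ≤ 0 then acc
        else (acc.1 ++ [(acc.2, acc.2 + size)], acc.2 + size))
      ([], 0)).1

-- ===== PORT B =====
-- literal transliteration of B: same guard/clamp/divmod, then each pair computed independently
def iter_chunk_offsets_py_alt (total : Int) (jobs : Int) : List (Int × Int) :=
  if total ≤ 0 ∨ jobs ≤ 1 then [] else
    let jobs' := max 1 (min jobs total)
    let base := PySem.Int.floordiv total jobs'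
    let extra := PySem.Int.mod total jobs'
    (PySem.List.pyRange 0 jobs' 1).map
      (fun i => (i * base + min i extra, (i + 1) * base + min (i + 1) extra))

-- ===== PRECONDITION & SPEC =====
def Spec_iter_chunk_offsets_py (total : Int) (jobs : Int) (out : List (Int × Int)) : Prop := out = iter_chunk_offsets_py_alt total jobs
instance (total : Int) (jobs : Int) (out : List (Int × Int)) : Decidable (Spec_iter_chunk_offsets_py total jobs out) := by unfold Spec_iter_chunk_offsets_py; infer_instance

-- ===== CLAIM (what is proved, stated in full; the proofs are below) =====
def Claim_equal_iter_chunk_offsets_py : Prop := ∀ (total : Int) (jobs : Int), Dom_iter_chunk_offsets_py total jobs → Spec_iter_chunk_offsets_py total jobs (iter_chunk_offsets_py total jobs)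

-- ===== LEMMAS AND PROOFS =====

-- A's fold from start 0 equals B's closed-form map, for any base ≥ 1 and extra ≥ 0.
lemma chunk_fold_closed (base extra : Int) (hb : 1 ≤ base) (he : 0 ≤ extra) (n : Nat) :
    ((PySem.List.pyRange 0 (n : Int) 1).foldl
      (fun (acc : List (Int × Int) × Int) i =>
        let size := base + (if i < extra then 1 else 0)
        if size ≤ 0 then acc
        else (acc.1 ++ [(acc.2, acc.2 + size)], acc.2 + size))
      ([], 0)) =
    ((PySem.List.pyRange 0 (n : Int) 1).map
      (fun i => (i * base + min i extra, (i + 1) * base + min (i + 1) extra)),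
      (n : Int) * base + min (n : Int) extra) := by
  induction n with
  | zero => simp [PySem.List.pyRange_one_eq_nil]; omega
  | succ m ih =>
    have hsr : PySem.List.pyRange 0 ((m : Int) + 1) 1 =
        PySem.List.pyRange 0 (m : Int) 1 ++ [(m : Int)] :=
      PySem.List.pyRange_one_succ_right (by exact_mod_cast Int.natCast_nonneg m)
    push_cast
    rw [hsr, List.foldl_append, List.map_append, ih]
    simp only [List.foldl_cons, List.foldl_nil, List.map_cons, List.map_nil]
    have hsz : ¬ (base + (if (m : Int) < extra then 1 else 0) ≤ 0) := by
      split_ifs <;> omega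
    simp only [hsz, if_false]
    refine Prod.ext ?_ ?_
    · simp only [List.append_cancel_left_eq, List.cons.injEq, and_true]
      refine Prod.ext rfl ?_
      simp only
      rcases Int.lt_or_le (m : Int) extra with h2 | h2
      · rw [if_pos h2, min_eq_left (by omega), min_eq_left (by omega)]; ring
      · rw [if_neg (by omega), min_eq_right (by omega), min_eq_right (by omega)]; ring
    · simp only
      rcases Int.lt_or_le (m : Int) extra with h2 | h2
      · rw [if_pos h2, min_eq_left (by omega), min_eq_left (by omega)]; ring
      · rw [if_neg (by omega), min_eq_right (by omega), min_eq_right (by omega)]; ring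

-- ===== VERDICT (by name: the statement is the Claim_ definition above) =====
theorem iter_chunk_offsets_py_spec : Claim_equal_iter_chunk_offsets_py := by
  intro total jobs _
  unfold Spec_iter_chunk_offsets_py iter_chunk_offsets_py iter_chunk_offsets_py_alt
  split_ifs with hguard
  · rfl
  · push_neg at hguard
    obtain ⟨ht, hj⟩ := hguard
    set j := max 1 (min jobs total) with hjdef
    have hj1 : 1 ≤ j := le_max_left _ _
    have hjt : j ≤ total := by
      have : min jobs total ≤ total := min_le_right _ _
      omega
    have hb : 1 ≤ PySem.Int.floordiv total j :=
      (PySem.Int.le_floordiv_iff_mul_le (by omega)).2 (by omega)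
    have he : 0 ≤ PySem.Int.mod total j := by
      rw [PySem.Int.mod_eq_emod_of_pos (show (0:Int) < j by omega)]
      exact Int.emod_nonneg _ (by omega)
    obtain ⟨n, hn⟩ : ∃ n : Nat, j = (n : Int) := ⟨j.toNat, by omega⟩
    rw [hn] at hb he ⊢
    dsimp only
    rw [chunk_fold_closed (PySem.Int.floordiv total (n : Int)) (PySem.Int.mod total (n : Int)) hb he n]
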